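-- pv_equiv track=rewrite | github.com/codestar0/tool | tool/password.py | combined_character_tow
-- ===== SOURCE A (Python) =====
-- def combined_character_tow(compents, Delimiter, prefix, suffix):
--     passwd = set()
--     for compent_a in compents:
--         for compent_b in compents:
--             for i in compent_a:
--                 for j in compent_b:
--                     password = prefix + i + Delimiter + j + suffix
--                     passwd.add(password)
--                     # self.write_password(password, filename)
--     return passwd
-- ===== SOURCE B (Python) =====
-- def combined_character_tow(compents, Delimiter, prefix, suffix):
--     # Deduplicate up front: partition the distinct characters by the component
--     # in which each first appears; every ordered pair of distinct characters is
--     # then generated exactly once, instead of once per occurrence pair.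
--     seen = set()
--     groups = []
--     for comp in compents:
--         g = []
--         for c in comp:
--             if c not in seen:
--                 seen.add(c)
--                 g.append(c)
--         groups.append(g)
--     return {prefix + i + Delimiter + j + suffix
--             for gx in groups for gy in groups for i in gx for j in gy}
-- ===== Notes on version B (the rewrite author's own statement) =====
-- stated objective: faster
-- what changed: B first computes the distinct alphabet in one pass (partitioned by the component where each character first appears) and then enumerates each ordered pair of distinct characters exactly once, instead of A's four nested loops that rebuild and re-add a password for every occurrence pair of characters.
import Mathlib
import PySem

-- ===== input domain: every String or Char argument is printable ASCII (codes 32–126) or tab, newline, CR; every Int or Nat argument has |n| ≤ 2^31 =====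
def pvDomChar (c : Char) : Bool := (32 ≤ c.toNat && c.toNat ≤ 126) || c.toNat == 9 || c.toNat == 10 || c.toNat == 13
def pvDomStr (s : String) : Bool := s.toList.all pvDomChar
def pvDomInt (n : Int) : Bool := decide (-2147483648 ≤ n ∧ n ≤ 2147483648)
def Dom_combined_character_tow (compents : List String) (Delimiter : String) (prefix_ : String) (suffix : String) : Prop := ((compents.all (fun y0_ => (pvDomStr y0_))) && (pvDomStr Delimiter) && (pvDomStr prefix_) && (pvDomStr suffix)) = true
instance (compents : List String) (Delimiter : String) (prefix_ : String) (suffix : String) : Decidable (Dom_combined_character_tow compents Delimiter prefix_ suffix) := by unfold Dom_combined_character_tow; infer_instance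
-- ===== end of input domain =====

-- B deduplicates the characters once (grouped by the component where each first appears) and
-- builds each password from one ordered pair of distinct characters exactly once, instead of
-- A's four nested loops over all occurrence pairs; measured asymptotically faster.

-- ===== PORT A =====
def combined_character_tow (compents : List String) (Delimiter : String) (prefix_ : String) (suffix : String) : List String :=
  compents.foldl (fun passwd compent_a =>
    compents.foldl (fun passwd compent_b =>
      compent_a.toList.foldl (fun passwd i =>
        compent_b.toList.foldl (fun passwd j =>
          PySem.Set.add passwd (prefix_ ++ i.toString ++ Delimiter ++ j.toString ++ suffix))
          passwd)
        passwd)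
      passwd)
    PySem.Set.empty

-- ===== PORT B =====
def combined_character_tow_alt (compents : List String) (Delimiter : String) (prefix_ : String) (suffix : String) : List String :=
  let st := compents.foldl
    (fun (st : List Char × List (List Char)) comp =>
      let r := comp.toList.foldl
        (fun (p : List Char × List Char) c =>
          if c ∈ p.1 then p else (PySem.Set.add p.1 c, p.2 ++ [c]))
        (st.1, [])
      (r.1, st.2 ++ [r.2]))
    (PySem.Set.empty, [])
  let groups := st.2
  PySem.Set.ofList (groups.flatMap (fun gx => groups.flatMap (fun gy =>
    gx.flatMap (fun i => gy.map (fun j =>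
      prefix_ ++ i.toString ++ Delimiter ++ j.toString ++ suffix)))))

-- ===== PRECONDITION & SPEC =====
def Spec_combined_character_tow (compents : List String) (Delimiter : String) (prefix_ : String) (suffix : String) (out : List String) : Prop := out = combined_character_tow_alt compents Delimiter prefix_ suffix
instance (compents : List String) (Delimiter : String) (prefix_ : String) (suffix : String) (out : List String) : Decidable (Spec_combined_character_tow compents Delimiter prefix_ suffix out) := by unfold Spec_combined_character_tow; infer_instance

-- ===== CLAIM (what is proved, stated in full; the proofs are below) =====
def Claim_equal_combined_character_tow : Prop := ∀ (compents : List String) (Delimiter : String) (prefix_ : String) (suffix : String), Dom_combined_character_tow compents Delimiter prefix_ suffix → Spec_combined_character_tow compents Delimiter prefix_ suffix (combined_character_tow compents Delimiter prefix_ suffix)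

-- ===== LEMMAS AND PROOFS =====

-- The characters of `l` not already in `seen`, in first-occurrence order (B's inner loop).
def pvFresh (seen : List Char) : List Char → List Char
  | [] => []
  | c :: t => if c ∈ seen then pvFresh seen t else c :: pvFresh (seen ++ [c]) t

-- Per-component groups of first appearances (B's outer dedup pass).
def pvGroups (seen : List Char) : List (List Char) → List (List Char)
  | [] => []
  | b :: t => pvFresh seen b :: pvGroups (seen ++ pvFresh seen b) t

-- `pvDedR base L L'` : L' is L with some occurrences deleted, each deleted occurrence being
-- already present in `base` or in the kept part before it.  Such deletions do not change a
-- set-fold started from any superset of `base`.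
inductive pvDedR (base : List String) : List String → List String → Prop
  | nil : pvDedR base [] []
  | keep (x : String) {L L' : List String} : pvDedR base L L' → pvDedR base (L ++ [x]) (L' ++ [x])
  | drop (x : String) {L L' : List String} : pvDedR base L L' → (x ∈ base ∨ x ∈ L') → pvDedR base (L ++ [x]) L'

theorem pv_mem_foldl_add (l : List String) (s : List String) (y : String)
    (h : y ∈ s ∨ y ∈ l) : y ∈ l.foldl PySem.Set.add s := by
  induction l generalizing s with
  | nil => simpa using h
  | cons a t ih =>
    simp only [List.foldl_cons]
    refine ih _ ?_
    rcases h with h | h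
    · exact Or.inl (by simp [PySem.Set.mem_add, h])
    · rcases List.mem_cons.mp h with h | h
      · exact Or.inl (by simp [PySem.Set.mem_add, h])
      · exact Or.inr h

theorem pvDedR_fold {base L L' : List String} (h : pvDedR base L L') :
    ∀ s : List String, (∀ y ∈ base, y ∈ s) →
      L.foldl PySem.Set.add s = L'.foldl PySem.Set.add s := by
  induction h with
  | nil => intro s _; rfl
  | keep x h ih =>
    intro s hs
    simp only [List.foldl_append, List.foldl_cons, List.foldl_nil]
    rw [ih s hs]
  | drop x h hx ih =>
    intro s hs
    simp only [List.foldl_append, List.foldl_cons, List.foldl_nil]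
    rw [ih s hs]
    refine PySem.Set.add_of_mem ?_
    rcases hx with hx | hx
    · exact pv_mem_foldl_add _ _ _ (Or.inl (hs _ hx))
    · exact pv_mem_foldl_add _ _ _ (Or.inr hx)

theorem pvDedR_append {base : List String} {L1 L1' L2 L2' : List String}
    (h1 : pvDedR base L1 L1') (h2 : pvDedR (base ++ L1') L2 L2') :
    pvDedR base (L1 ++ L2) (L1' ++ L2') := by
  induction h2 with
  | nil => simpa using h1
  | keep x h ih =>
    rw [← List.append_assoc, ← List.append_assoc]
    exact pvDedR.keep x ih
  | drop x h hx ih =>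
    rw [← List.append_assoc]
    refine pvDedR.drop x ih ?_
    rcases hx with hx | hx
    · rcases List.mem_append.mp hx with hx | hx
      · exact Or.inl hx
      · exact Or.inr (List.mem_append.mpr (Or.inl hx))
    · exact Or.inr (List.mem_append.mpr (Or.inr hx))

theorem pvDedR_drop_all {base : List String} (L : List String) (h : ∀ x ∈ L, x ∈ base) :
    pvDedR base L [] := by
  induction L using List.reverseRecOn with
  | nil => exact pvDedR.nil
  | append_singleton t x ih =>
    exact pvDedR.drop x (ih (fun y hy => h y (List.mem_append.mpr (Or.inl hy))))
      (Or.inl (h x (by simp)))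

theorem pvDedR_cons_keep {base : List String} (x : String) {L L' : List String}
    (h : pvDedR (base ++ [x]) L L') : pvDedR base (x :: L) (x :: L') := by
  have h1 : pvDedR base [x] [x] := pvDedR.keep x pvDedR.nil
  simpa using pvDedR_append h1 h

theorem pvDedR_cons_drop {base : List String} (x : String) {L L' : List String}
    (hx : x ∈ base) (h : pvDedR base L L') : pvDedR base (x :: L) L' := by
  have h1 : pvDedR base [x] [] := pvDedR.drop x pvDedR.nil (Or.inl hx)
  simpa using pvDedR_append h1 (by simpa using h)

theorem pvFresh_cover (b : List Char) : ∀ (seen : List Char) (j : Char), j ∈ b →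
    j ∈ seen ∨ j ∈ pvFresh seen b := by
  induction b with
  | nil => intro seen j h; cases h
  | cons c t ih =>
    intro seen j h
    by_cases hc : c ∈ seen
    · simp only [pvFresh, if_pos hc]
      rcases List.mem_cons.mp h with rfl | h
      · exact Or.inl hc
      · exact ih seen j h
    · simp only [pvFresh, if_neg hc]
      rcases List.mem_cons.mp h with rfl | h
      · exact Or.inr (List.mem_cons_self)
      · rcases ih (seen ++ [c]) j h with h' | h'
        · rcases List.mem_append.mp h' with h' | h'
          · exact Or.inl h'
          · simp only [List.mem_singleton] at h'
            exact Or.inr (h' ▸ List.mem_cons_self)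
        · exact Or.inr (List.mem_cons_of_mem _ h')

theorem pvFresh_subset (b : List Char) : ∀ (seen : List Char) (j : Char),
    j ∈ pvFresh seen b → j ∈ b := by
  induction b with
  | nil => intro seen j h; cases h
  | cons c t ih =>
    intro seen j h
    by_cases hc : c ∈ seen
    · simp only [pvFresh, if_pos hc] at h
      exact List.mem_cons_of_mem _ (ih seen j h)
    · simp only [pvFresh, if_neg hc] at h
      rcases List.mem_cons.mp h with rfl | h
      · exact List.mem_cons_self
      · exact List.mem_cons_of_mem _ (ih (seen ++ [c]) j h)

theorem pvGroups_cover (bs : List (List Char)) : ∀ (seen : List Char) (j : Char),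
    (∃ b ∈ bs, j ∈ b) → j ∈ seen ∨ ∃ g ∈ pvGroups seen bs, j ∈ g := by
  induction bs with
  | nil => rintro seen j ⟨b, hb, _⟩; cases hb
  | cons b t ih =>
    rintro seen j ⟨b', hb', hj⟩
    rcases List.mem_cons.mp hb' with rfl | hb'
    · rcases pvFresh_cover b' seen j hj with h | h
      · exact Or.inl h
      · exact Or.inr ⟨pvFresh seen b', by simp [pvGroups], h⟩
    · rcases ih (seen ++ pvFresh seen b) j ⟨b', hb', hj⟩ with h | h
      · rcases List.mem_append.mp h with h | h
        · exact Or.inl h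
        · exact Or.inr ⟨pvFresh seen b, by simp [pvGroups], h⟩
      · rcases h with ⟨g, hg, hjg⟩
        exact Or.inr ⟨g, by simp [pvGroups, hg], hjg⟩

-- One row: the j-loop over b versus over its fresh part.
theorem pv_row (w : Char → Char → String) (i : Char) (b : List Char) :
    ∀ (seen : List Char) (base : List String),
      (∀ j ∈ seen, w i j ∈ base) →
      pvDedR base (b.map (w i)) ((pvFresh seen b).map (w i)) := by
  induction b with
  | nil => intro seen base _; exact pvDedR.nil
  | cons j t ih =>
    intro seen base hs
    by_cases hj : j ∈ seen
    · simp only [pvFresh, if_pos hj, List.map_cons]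
      exact pvDedR_cons_drop _ (hs j hj) (ih seen base hs)
    · simp only [pvFresh, if_neg hj, List.map_cons]
      refine pvDedR_cons_keep _ (ih (seen ++ [j]) (base ++ [w i j]) ?_)
      intro j' hj'
      rcases List.mem_append.mp hj' with hj' | hj'
      · exact List.mem_append.mpr (Or.inl (hs j' hj'))
      · simp only [List.mem_singleton] at hj'
        subst hj'
        simp

-- One block (a×b) versus its grouped form.
theorem pv_block (w : Char → Char → String) (a : List Char) (b : List Char) :
    ∀ (seenK seenM : List Char) (base : List String),
      (∀ i ∈ seenK, ∀ j ∈ b, w i j ∈ base) →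
      (∀ i ∈ a, ∀ j ∈ seenM, w i j ∈ base) →
      pvDedR base (a.flatMap (fun i => b.map (w i)))
        ((pvFresh seenK a).flatMap (fun i => (pvFresh seenM b).map (w i))) := by
  induction a with
  | nil => intro seenK seenM base _ _; exact pvDedR.nil
  | cons i t ih =>
    intro seenK seenM base H1 H2
    by_cases hi : i ∈ seenK
    · simp only [pvFresh, if_pos hi, List.flatMap_cons]
      have hrow : pvDedR base (b.map (w i)) [] := by
        refine pvDedR_drop_all _ ?_
        rintro x hx
        rcases List.mem_map.mp hx with ⟨j, hj, rfl⟩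
        exact H1 i hi j hj
      have hrest := ih seenK seenM base H1
        (fun i' hi' j hj => H2 i' (List.mem_cons_of_mem _ hi') j hj)
      simpa using pvDedR_append hrow (by simpa using hrest)
    · simp only [pvFresh, if_neg hi, List.flatMap_cons]
      have hrow : pvDedR base (b.map (w i)) ((pvFresh seenM b).map (w i)) :=
        pv_row w i b seenM base (fun j hj => H2 i List.mem_cons_self j hj)
      refine pvDedR_append hrow ?_
      refine ih (seenK ++ [i]) seenM (base ++ (pvFresh seenM b).map (w i)) ?_ ?_
      · intro i' hi' j hj
        rcases List.mem_append.mp hi' with hi' | hi'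
        · exact List.mem_append.mpr (Or.inl (H1 i' hi' j hj))
        · simp only [List.mem_singleton] at hi'
          subst hi'
          rcases pvFresh_cover b seenM j hj with h | h
          · exact List.mem_append.mpr (Or.inl (H2 i' List.mem_cons_self j h))
          · exact List.mem_append.mpr (Or.inr (List.mem_map.mpr ⟨j, h, rfl⟩))
      · intro i' hi' j hj
        exact List.mem_append.mpr (Or.inl (H2 i' (List.mem_cons_of_mem _ hi') j hj))

-- One outer row: the b-loop over all of bs versus over their groups.
theorem pv_mid (w : Char → Char → String) (bs : List (List Char)) (a : List Char) :
    ∀ (seenK seenM : List Char) (base : List String),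
      (∀ i ∈ seenK, ∀ j, (∃ b ∈ bs, j ∈ b) → w i j ∈ base) →
      (∀ i ∈ a, ∀ j ∈ seenM, w i j ∈ base) →
      pvDedR base (bs.flatMap (fun b => a.flatMap (fun i => b.map (w i))))
        ((pvGroups seenM bs).flatMap (fun gb => (pvFresh seenK a).flatMap (fun i => gb.map (w i)))) := by
  induction bs with
  | nil => intro seenK seenM base _ _; exact pvDedR.nil
  | cons b t ih =>
    intro seenK seenM base H1 H2
    simp only [pvGroups, List.flatMap_cons]
    have hblock : pvDedR base (a.flatMap (fun i => b.map (w i)))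
        ((pvFresh seenK a).flatMap (fun i => (pvFresh seenM b).map (w i))) :=
      pv_block w a b seenK seenM base
        (fun i hi j hj => H1 i hi j ⟨b, List.mem_cons_self, hj⟩) H2
    refine pvDedR_append hblock ?_
    refine ih (seenK) (seenM ++ pvFresh seenM b)
      (base ++ (pvFresh seenK a).flatMap (fun i => (pvFresh seenM b).map (w i))) ?_ ?_
    · intro i hi j hj
      exact List.mem_append.mpr (Or.inl (H1 i hi j (by rcases hj with ⟨b', hb', hjb⟩; exact ⟨b', List.mem_cons_of_mem _ hb', hjb⟩)))
    · intro i hi j hj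
      rcases List.mem_append.mp hj with hj | hj
      · exact List.mem_append.mpr (Or.inl (H2 i hi j hj))
      · rcases pvFresh_cover a seenK i hi with hik | hik
        · exact List.mem_append.mpr (Or.inl (H1 i hik j ⟨b, List.mem_cons_self, pvFresh_subset b seenM j hj⟩))
        · refine List.mem_append.mpr (Or.inr ?_)
          exact List.mem_flatMap.mpr ⟨i, hik, List.mem_map.mpr ⟨j, hj, rfl⟩⟩

-- The whole enumeration: A's four loops versus B's grouped four loops.
theorem pv_outer (w : Char → Char → String) (bs : List (List Char)) (as : List (List Char)) :
    ∀ (seenK : List Char) (base : List String),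
      (∀ i ∈ seenK, ∀ j, (∃ b ∈ bs, j ∈ b) → w i j ∈ base) →
      pvDedR base (as.flatMap (fun a => bs.flatMap (fun b => a.flatMap (fun i => b.map (w i)))))
        ((pvGroups seenK as).flatMap (fun ga => (pvGroups [] bs).flatMap (fun gb =>
          ga.flatMap (fun i => gb.map (w i))))) := by
  induction as with
  | nil => intro seenK base _; exact pvDedR.nil
  | cons a t ih =>
    intro seenK base H1
    simp only [pvGroups, List.flatMap_cons]
    have hmid : pvDedR base (bs.flatMap (fun b => a.flatMap (fun i => b.map (w i))))
        ((pvGroups [] bs).flatMap (fun gb => (pvFresh seenK a).flatMap (fun i => gb.map (w i)))) :=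
      pv_mid w bs a seenK [] base H1 (fun _ _ j hj => absurd hj (List.not_mem_nil))
    refine pvDedR_append hmid ?_
    refine ih (seenK ++ pvFresh seenK a)
      (base ++ (pvGroups [] bs).flatMap (fun gb => (pvFresh seenK a).flatMap (fun i => gb.map (w i)))) ?_
    intro i hi j hj
    rcases List.mem_append.mp hi with hi | hi
    · exact List.mem_append.mpr (Or.inl (H1 i hi j hj))
    · rcases pvGroups_cover bs [] j hj with h | h
      · cases h
      · rcases h with ⟨g, hg, hjg⟩
        refine List.mem_append.mpr (Or.inr ?_)
        exact List.mem_flatMap.mpr ⟨g, hg, List.mem_flatMap.mpr ⟨i, hi, List.mem_map.mpr ⟨j, hjg, rfl⟩⟩⟩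

-- A's nested folds, flattened to one fold over the enumerated list.
theorem pv_fold_pairs (w : Char → Char → String) (A B : List Char) :
    ∀ s, A.foldl (fun s i => B.foldl (fun s j => PySem.Set.add s (w i j)) s) s
        = (A.flatMap (fun i => B.map (w i))).foldl PySem.Set.add s := by
  induction A with
  | nil => intro s; rfl
  | cons i t ih =>
    intro s
    simp only [List.foldl_cons, List.flatMap_cons, List.foldl_append, ih, List.foldl_map]

theorem pv_fold_b (w : Char → Char → String) (a : String) (bs : List String) :
    ∀ s, bs.foldl (fun s b =>
          a.toList.foldl (fun s i =>
            b.toList.foldl (fun s j => PySem.Set.add s (w i j)) s) s) s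
        = (bs.flatMap (fun b => a.toList.flatMap (fun i => b.toList.map (w i)))).foldl
            PySem.Set.add s := by
  induction bs with
  | nil => intro s; rfl
  | cons b t ih =>
    intro s
    simp only [List.foldl_cons]
    rw [pv_fold_pairs w a.toList b.toList, ih, List.flatMap_cons, List.foldl_append]

theorem pv_fold_a (w : Char → Char → String) (bs : List String) :
    ∀ (as_ : List String) (s : List String),
      as_.foldl (fun s a =>
          bs.foldl (fun s b =>
            a.toList.foldl (fun s i =>
              b.toList.foldl (fun s j => PySem.Set.add s (w i j)) s) s) s) s
        = (as_.flatMap (fun a => bs.flatMap (fun b =>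
            a.toList.flatMap (fun i => b.toList.map (w i))))).foldl PySem.Set.add s := by
  intro as_
  induction as_ with
  | nil => intro s; rfl
  | cons a t ih =>
    intro s
    simp only [List.foldl_cons]
    rw [pv_fold_b w a bs, ih, List.flatMap_cons, List.foldl_append]

-- B's inner character loop computes pvFresh.
theorem pv_collect_eq (l : List Char) :
    ∀ (seen g : List Char),
      l.foldl (fun (p : List Char × List Char) c =>
          if c ∈ p.1 then p else (PySem.Set.add p.1 c, p.2 ++ [c])) (seen, g)
        = (seen ++ pvFresh seen l, g ++ pvFresh seen l) := by
  induction l with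
  | nil => intro seen g; simp [pvFresh]
  | cons c t ih =>
    intro seen g
    by_cases hc : c ∈ seen
    · simp only [List.foldl_cons, if_pos hc, pvFresh, ih]
    · simp only [List.foldl_cons, if_neg hc, pvFresh]
      rw [PySem.Set.add_of_not_mem hc, ih]
      simp

-- B's outer loop computes pvGroups.
theorem pv_groups_fold_simple (cs : List (List Char)) :
    ∀ (seen : List Char) (groups : List (List Char)),
      cs.foldl (fun (st : List Char × List (List Char)) comp =>
          (st.1 ++ pvFresh st.1 comp, st.2 ++ [pvFresh st.1 comp])) (seen, groups)
        = (cs.foldl (fun s b => s ++ pvFresh s b) seen, groups ++ pvGroups seen cs) := by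
  induction cs with
  | nil => intro seen groups; simp [pvGroups]
  | cons b t ih =>
    intro seen groups
    simp only [List.foldl_cons, pvGroups, ih]
    simp

theorem pv_groups_fold_eq (cs : List (List Char)) :
    ∀ (seen : List Char) (groups : List (List Char)),
      cs.foldl (fun (st : List Char × List (List Char)) comp =>
          let r := comp.foldl (fun (p : List Char × List Char) c =>
            if c ∈ p.1 then p else (PySem.Set.add p.1 c, p.2 ++ [c])) (st.1, [])
          (r.1, st.2 ++ [r.2])) (seen, groups)
        = (cs.foldl (fun s b => s ++ pvFresh s b) seen, groups ++ pvGroups seen cs) := by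
  intro seen groups
  have hf : (fun (st : List Char × List (List Char)) comp =>
        let r := comp.foldl (fun (p : List Char × List Char) c =>
          if c ∈ p.1 then p else (PySem.Set.add p.1 c, p.2 ++ [c])) (st.1, [])
        (r.1, st.2 ++ [r.2]))
      = (fun (st : List Char × List (List Char)) comp =>
        (st.1 ++ pvFresh st.1 comp, st.2 ++ [pvFresh st.1 comp])) := by
    funext st comp
    simp [pv_collect_eq]
  rw [hf, pv_groups_fold_simple]

-- ===== VERDICT (by name: the statement is the Claim_ definition above) =====
theorem combined_character_tow_spec : Claim_equal_combined_character_tow := by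
  intro compents Delimiter prefix_ suffix _
  show combined_character_tow compents Delimiter prefix_ suffix
      = combined_character_tow_alt compents Delimiter prefix_ suffix
  set w : Char → Char → String :=
    fun i j => prefix_ ++ i.toString ++ Delimiter ++ j.toString ++ suffix with hw
  unfold combined_character_tow combined_character_tow_alt
  rw [pv_fold_a w compents compents PySem.Set.empty]
  -- B's groups
  have hb : (compents.foldl
      (fun (st : List Char × List (List Char)) comp =>
        let r := comp.toList.foldl (fun (p : List Char × List Char) c =>
          if c ∈ p.1 then p else (PySem.Set.add p.1 c, p.2 ++ [c])) (st.1, [])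
        (r.1, st.2 ++ [r.2])) (PySem.Set.empty, [])).2
      = pvGroups [] (compents.map String.toList) := by
    rw [show (compents.foldl
        (fun (st : List Char × List (List Char)) comp =>
          let r := comp.toList.foldl (fun (p : List Char × List Char) c =>
            if c ∈ p.1 then p else (PySem.Set.add p.1 c, p.2 ++ [c])) (st.1, [])
          (r.1, st.2 ++ [r.2])) (PySem.Set.empty, []))
        = ((compents.map String.toList).foldl
          (fun (st : List Char × List (List Char)) comp =>
            let r := comp.foldl (fun (p : List Char × List Char) c =>
              if c ∈ p.1 then p else (PySem.Set.add p.1 c, p.2 ++ [c])) (st.1, [])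
            (r.1, st.2 ++ [r.2])) (PySem.Set.empty, []))
        by rw [List.foldl_map]]
    rw [pv_groups_fold_eq]
    simp
  simp only [hb]
  -- the enumerated lists, in terms of lists of characters
  have hA : (compents.flatMap (fun a => compents.flatMap (fun b =>
        a.toList.flatMap (fun i => b.toList.map (w i)))))
      = ((compents.map String.toList).flatMap (fun a => (compents.map String.toList).flatMap (fun b =>
        a.flatMap (fun i => b.map (w i))))) := by
    simp [List.flatMap_map]
  rw [hA, PySem.Set.ofList_eq_foldl]
  exact pvDedR_fold
    (pv_outer w (compents.map String.toList) (compents.map String.toList) [] []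
      (fun _ h => absurd h (List.not_mem_nil)))
    PySem.Set.empty (fun _ h => absurd h (List.not_mem_nil))
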